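-- pv_equiv track=rewrite | github.com/indicwiki-iiit/schools | curDir/data/titles_translation/create_title_dict.py | handle_symbol_merging
-- ===== SOURCE A (Python) =====
-- def handle_symbol_merging(current_list, symbol):
--     new_list = []
--     current_abbreviation = ""
--     for token in current_list:
--         if token.endswith(symbol) or (len(token) >= 2 and token.endswith(symbol + ')')):
--             current_abbreviation += token
--         else:
--             if len(current_abbreviation) > 0:
--                 new_list.append(current_abbreviation)
--             current_abbreviation = ""
--             new_list.append(token)
--     if(len(current_abbreviation)) > 0:
--         new_list.append(current_abbreviation)
--     return new_list
-- ===== SOURCE B (Python) =====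
-- def handle_symbol_merging(current_list, symbol):
--     # Run-scanning rewrite: join each maximal run of abbreviation tokens directly,
--     # instead of A's accumulator state machine with an end-of-loop flush.
--     def is_abbr(token):
--         return token.endswith(symbol) or (len(token) >= 2 and token.endswith(symbol + ')'))
--     out = []
--     i = 0
--     n = len(current_list)
--     while i < n:
--         token = current_list[i]
--         if is_abbr(token):
--             j = i + 1
--             while j < n and is_abbr(current_list[j]):
--                 j += 1
--             merged = ''.join(current_list[i:j])
--             if merged:
--                 out.append(merged)
--             i = j
--         else:
--             out.append(token)
--             i += 1
--     return out
-- ===== Notes on version B (the rewrite author's own statement) =====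
-- stated objective: alternative
-- what changed: Replaced A's accumulator state machine (current_abbreviation with an end-of-loop flush) by a run-scanning pass that finds each maximal run of abbreviation tokens and emits its ''.join directly.
import Mathlib
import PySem

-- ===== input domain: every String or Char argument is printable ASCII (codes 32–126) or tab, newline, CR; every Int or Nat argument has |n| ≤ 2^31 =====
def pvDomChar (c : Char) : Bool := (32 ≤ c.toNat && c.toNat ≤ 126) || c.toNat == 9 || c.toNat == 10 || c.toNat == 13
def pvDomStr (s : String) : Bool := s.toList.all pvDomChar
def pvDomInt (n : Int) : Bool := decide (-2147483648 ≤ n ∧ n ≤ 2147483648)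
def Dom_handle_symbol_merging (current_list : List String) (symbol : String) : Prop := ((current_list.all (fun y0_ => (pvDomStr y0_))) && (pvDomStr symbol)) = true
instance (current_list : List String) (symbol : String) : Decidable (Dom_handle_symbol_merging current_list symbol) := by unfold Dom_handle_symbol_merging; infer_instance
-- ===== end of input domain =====

-- B replaces A's accumulator state machine by a run-scanning pass (same cost); equivalence is total.

-- ===== PORT A =====
-- the shared abbreviation test: token.endswith(symbol) or (len(token) >= 2 and token.endswith(symbol + ')'))
def pvIsAbbr (symbol token : String) : Bool :=
  PySem.Str.endswith token symbol || (decide (PySem.Str.len token ≥ 2) && PySem.Str.endswith token (symbol ++ ")"))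

-- A's for-loop over current_list, carrying new_list and current_abbreviation
def pvLoopA (symbol : String) : List String → List String → String → List String
  | [], newList, cur => newList ++ (if PySem.Str.len cur > 0 then [cur] else [])
  | t :: rest, newList, cur =>
    if pvIsAbbr symbol t then
      pvLoopA symbol rest newList (cur ++ t)
    else
      pvLoopA symbol rest (newList ++ (if PySem.Str.len cur > 0 then [cur] else []) ++ [t]) ""

def handle_symbol_merging (current_list : List String) (symbol : String) : List String :=
  pvLoopA symbol current_list [] ""

-- ===== PORT B =====
-- B's outer while loop: on an abbreviation token, scan its maximal run and emit the join
def pvLoopB (symbol : String) : List String → List String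
  | [] => []
  | t :: rest =>
    if pvIsAbbr symbol t then
      let merged := PySem.Str.join "" (t :: rest.takeWhile (pvIsAbbr symbol))
      (if PySem.Str.len merged > 0 then [merged] else []) ++ pvLoopB symbol (rest.dropWhile (pvIsAbbr symbol))
    else
      t :: pvLoopB symbol rest
termination_by l => l.length
decreasing_by
  · exact Nat.lt_succ_of_le (List.length_dropWhile_le _ _)
  · simp

def handle_symbol_merging_alt (current_list : List String) (symbol : String) : List String :=
  pvLoopB symbol current_list

-- ===== PRECONDITION & SPEC =====
def Spec_handle_symbol_merging (current_list : List String) (symbol : String) (out : List String) : Prop := out = handle_symbol_merging_alt current_list symbol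
instance (current_list : List String) (symbol : String) (out : List String) : Decidable (Spec_handle_symbol_merging current_list symbol out) := by unfold Spec_handle_symbol_merging; infer_instance

-- ===== CLAIM (what is proved, stated in full; the proofs are below) =====
def Claim_equal_handle_symbol_merging : Prop := ∀ (current_list : List String) (symbol : String), Dom_handle_symbol_merging current_list symbol → Spec_handle_symbol_merging current_list symbol (handle_symbol_merging current_list symbol)

-- ===== LEMMAS AND PROOFS =====

theorem pv_join_nil_cons (a : String) (l : List String) :
    PySem.Str.join "" (a :: l) = a ++ PySem.Str.join "" l := by
  have h : (PySem.Str.join "" (a :: l)).toList = (a ++ PySem.Str.join "" l).toList := by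
    simp [PySem.Str.toList_join, PySem.Chars.join, List.intercalate]
    cases l <;> simp
  exact String.toList_injective h

theorem pvLoopA_shift (symbol : String) (xs : List String) (nl : List String) (cur : String) :
    pvLoopA symbol xs nl cur = nl ++ pvLoopA symbol xs [] cur := by
  induction xs generalizing nl cur with
  | nil => simp [pvLoopA]
  | cons t rest ih =>
    simp only [pvLoopA]
    by_cases h : pvIsAbbr symbol t = true
    · rw [if_pos h, if_pos h, ih]
    · rw [if_neg h, if_neg h, ih, ih (([] ++ if PySem.Str.len cur > 0 then [cur] else []) ++ [t])]
      simp

theorem pvLoopB_flush (symbol : String) (ys : List String) :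
    pvLoopB symbol ys =
      (if PySem.Str.len (PySem.Str.join "" (ys.takeWhile (pvIsAbbr symbol))) > 0
        then [PySem.Str.join "" (ys.takeWhile (pvIsAbbr symbol))] else [])
        ++ pvLoopB symbol (ys.dropWhile (pvIsAbbr symbol)) := by
  match ys with
  | [] => simp [pvLoopB, PySem.Str.join, PySem.Str.len]
  | t :: rest =>
    by_cases h : pvIsAbbr symbol t = true
    · simp [pvLoopB, h]
    · simp [pvLoopB, h, PySem.Str.join, PySem.Str.len]

theorem pv_main (symbol : String) (xs : List String) (cur : String) :
    pvLoopA symbol xs [] cur =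
      (if PySem.Str.len (cur ++ PySem.Str.join "" (xs.takeWhile (pvIsAbbr symbol))) > 0
        then [cur ++ PySem.Str.join "" (xs.takeWhile (pvIsAbbr symbol))] else [])
        ++ pvLoopB symbol (xs.dropWhile (pvIsAbbr symbol)) := by
  induction xs generalizing cur with
  | nil => simp [pvLoopA, pvLoopB, PySem.Str.join]
  | cons t rest ih =>
    by_cases h : pvIsAbbr symbol t = true
    · simp only [pvLoopA, h, if_pos, List.takeWhile_cons, List.dropWhile_cons]
      rw [ih (cur ++ t)]
      simp [pv_join_nil_cons, String.append_assoc]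
    · simp only [pvLoopA]
      rw [if_neg h, pvLoopA_shift, ih ""]
      simp only [List.nil_append, String.empty_append, List.append_assoc]
      rw [← pvLoopB_flush]
      simp [h, pvLoopB, PySem.Str.join, String.append_empty]

-- ===== VERDICT (by name: the statement is the Claim_ definition above) =====
theorem handle_symbol_merging_spec : Claim_equal_handle_symbol_merging := by
  intro l s _
  unfold Spec_handle_symbol_merging handle_symbol_merging handle_symbol_merging_alt
  rw [pv_main, pvLoopB_flush s l]
  simp
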